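-- pv_equiv track=rewrite | github.com/cwar/setlist-console | setlist_console/main.py | organize_songs_by_album
-- ===== SOURCE A (Python) =====
-- def organize_songs_by_album(album_data):
--     albums = {}
--     for entry in album_data:
--         album_title = entry["album_title"]
--         song_name = entry["song_name"]
--         if album_title not in albums:
--             albums[album_title] = []
--         albums[album_title].append(song_name)
--     # Sort the albums by title
--     sorted_albums = dict(sorted(albums.items()))
--     return sorted_albums
-- ===== SOURCE B (Python) =====
-- def organize_songs_by_album(album_data):
--     titles = sorted({entry["album_title"] for entry in album_data})
--     return {t: [e["song_name"] for e in album_data if e["album_title"] == t]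
--             for t in titles}
-- ===== Notes on version B (the rewrite author's own statement) =====
-- stated objective: alternative
-- what changed: Replaces A's build-a-dict-of-lists-then-sort-the-items with computing the sorted distinct titles first and then building the result with one filtering pass over the data per title (no accumulator dict at all).
import Mathlib
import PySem

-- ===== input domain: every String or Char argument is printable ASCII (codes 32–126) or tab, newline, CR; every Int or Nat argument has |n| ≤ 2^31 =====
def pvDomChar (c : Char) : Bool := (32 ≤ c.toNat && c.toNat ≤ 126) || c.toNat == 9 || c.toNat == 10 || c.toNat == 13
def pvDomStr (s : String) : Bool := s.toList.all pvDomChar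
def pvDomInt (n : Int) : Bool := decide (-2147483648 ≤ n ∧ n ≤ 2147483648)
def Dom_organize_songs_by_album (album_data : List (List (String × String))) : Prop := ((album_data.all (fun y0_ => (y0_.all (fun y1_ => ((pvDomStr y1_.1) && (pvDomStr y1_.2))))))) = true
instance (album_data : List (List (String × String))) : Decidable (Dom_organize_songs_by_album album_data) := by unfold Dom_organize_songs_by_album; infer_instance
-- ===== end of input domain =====

-- B replaces A's build-a-dict-then-sort-its-items with sorted-distinct-titles plus one filter pass
-- per title (same return value; neither version mutates its input).

-- ===== PORT A =====
-- entry["k"]: the KeyError case is excluded by Pre_; it is ported as getD with a junk default "".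
def organize_songs_by_album (album_data : List (List (String × String))) : List (String × List String) :=
  let albums := album_data.foldl (fun d entry =>
    let album_title := (PySem.Dict.mk entry).getD "album_title" ""
    let song_name := (PySem.Dict.mk entry).getD "song_name" ""
    let d := if d.contains album_title = false then d.insert album_title ([] : List String) else d
    -- albums[album_title].append(song_name): the key is present here, so this is d[k] = d[k] + [s]
    d.modify album_title [] (fun l => l ++ [song_name])) PySem.Dict.empty
  -- sorted(albums.items()): dict keys are unique, so tuple comparison = comparison of the first components
  PySem.List.sorted albums.items (fun p => p.1) false

-- ===== PORT B =====
def organize_songs_by_album_alt (album_data : List (List (String × String))) : List (String × List String) :=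
  let titles := PySem.List.sorted
    (PySem.Set.ofList (album_data.map (fun entry => (PySem.Dict.mk entry).getD "album_title" "")))
    (fun t => t) false
  titles.map (fun t =>
    (t, (album_data.filter (fun e => (PySem.Dict.mk e).getD "album_title" "" == t)).map
          (fun e => (PySem.Dict.mk e).getD "song_name" "")))

-- ===== PRECONDITION & SPEC =====
-- Pre_ excludes exactly the inputs where A raises KeyError: an entry missing "album_title" or "song_name".
def Pre_organize_songs_by_album (album_data : List (List (String × String))) : Prop :=
  (album_data.all (fun entry =>
    (PySem.Dict.mk entry).contains "album_title" && (PySem.Dict.mk entry).contains "song_name")) = true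
instance (album_data : List (List (String × String))) : Decidable (Pre_organize_songs_by_album album_data) := by unfold Pre_organize_songs_by_album; infer_instance
def pvWitness_organize_songs_by_album : (List (List (String × String))) :=
  [[("album_title", "B"), ("song_name", "s1")], [("album_title", "A"), ("song_name", "s2")],
   [("album_title", "B"), ("song_name", "s3")]]
def Spec_organize_songs_by_album (album_data : List (List (String × String))) (out : List (String × List String)) : Prop := out = organize_songs_by_album_alt album_data
instance (album_data : List (List (String × String))) (out : List (String × List String)) : Decidable (Spec_organize_songs_by_album album_data out) := by unfold Spec_organize_songs_by_album; infer_instance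

-- ===== CLAIM (what is proved, stated in full; the proofs are below) =====
def Claim_equal_organize_songs_by_album : Prop := ∀ (album_data : List (List (String × String))), Dom_organize_songs_by_album album_data → Pre_organize_songs_by_album album_data → Spec_organize_songs_by_album album_data (organize_songs_by_album album_data)

-- ===== LEMMAS AND PROOFS =====

-- A's loop body is a single modify: inserting [] first and then appending is appending to the default.
lemma step_eq (d : PySem.Dict String (List String)) (t s : String) :
    (if d.contains t = false then d.insert t ([] : List String) else d).modify t [] (fun l => l ++ [s])
      = d.modify t [] (fun l => l ++ [s]) := by
  by_cases h : d.contains t = false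
  · have h0 := PySem.Dict.getD_of_not_contains d (k := t) (d0 := ([] : List String)) h
    simp [h, PySem.Dict.modify, PySem.Dict.insert_insert_self, h0]
  · simp [h]

-- The heart of the equivalence: the sorted items of the grouping dict are the per-title filters
-- over the sorted distinct titles.
lemma dict_sorted_items_eq (es : List (List (String × String))) :
    PySem.List.sorted
      ((es.foldl (fun d e => d.modify ((PySem.Dict.mk e).getD "album_title" "") []
          (fun l => l ++ [(PySem.Dict.mk e).getD "song_name" ""])) PySem.Dict.empty).items)
      (fun p => p.1) false
    = (PySem.List.sorted (PySem.Set.ofList (es.map (fun e => (PySem.Dict.mk e).getD "album_title" ""))) (fun t => t) false).map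
        (fun t => (t, (es.filter (fun e => (PySem.Dict.mk e).getD "album_title" "" == t)).map
          (fun e => (PySem.Dict.mk e).getD "song_name" ""))) := by
  set tOf := fun e : List (String × String) => (PySem.Dict.mk e).getD "album_title" "" with htOf
  set sOf := fun e : List (String × String) => (PySem.Dict.mk e).getD "song_name" "" with hsOf
  set D := es.foldl (fun d e => d.modify (tOf e) [] (fun l => l ++ [sOf e])) PySem.Dict.empty with hD
  have hkeys : D.keys = PySem.Set.ofList (es.map tOf) := by
    rw [hD, PySem.Dict.keys_foldl_modify_key]
    rfl
  have hnodup : D.keys.Nodup := by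
    rw [hkeys]; exact PySem.Set.nodup_ofList _
  have hgetD : ∀ c, D.getD c [] = (es.filter (fun e => tOf e == c)).map sOf := by
    intro c
    rw [hD, show (es.foldl (fun d e => d.modify (tOf e) [] (fun l => l ++ [sOf e])) PySem.Dict.empty)
        = ((es.map (fun e => (tOf e, sOf e))).foldl (fun d p => d.modify p.1 [] (fun l => l ++ [p.2])) PySem.Dict.empty)
      from (List.foldl_map (f := fun e => (tOf e, sOf e))
        (g := fun (d : PySem.Dict String (List String)) p => d.modify p.1 [] (fun l => l ++ [p.2]))).symm]
    rw [PySem.Dict.getD_foldl_modify_append]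
    simp [List.filter_map, Function.comp_def]
  have hitems : D.items = (PySem.Set.ofList (es.map tOf)).map
      (fun t => (t, (es.filter (fun e => tOf e == t)).map sOf)) := by
    rw [PySem.Dict.items_eq_map_keys D hnodup ([] : List String), hkeys]
    exact List.map_congr_left (fun t _ => by rw [hgetD t])
  rw [hitems]
  apply PySem.List.sorted_eq_of_perm_of_pairwise_lt
  · exact (PySem.List.sorted_perm _ _ _).map _
  · have := PySem.List.sorted_ofList_pairwise_lt (es.map tOf)
    exact List.Pairwise.map _ (fun a b h => h) this

-- ===== VERDICT (by name: the statement is the Claim_ definition above) =====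
theorem organize_songs_by_album_spec : Claim_equal_organize_songs_by_album := by
  intro album_data _ _
  show _ = _
  unfold organize_songs_by_album organize_songs_by_album_alt
  have hfold : album_data.foldl (fun d entry =>
      let album_title := (PySem.Dict.mk entry).getD "album_title" ""
      let song_name := (PySem.Dict.mk entry).getD "song_name" ""
      let d := if d.contains album_title = false then d.insert album_title ([] : List String) else d
      d.modify album_title [] (fun l => l ++ [song_name])) PySem.Dict.empty
    = album_data.foldl (fun d e => d.modify ((PySem.Dict.mk e).getD "album_title" "") []
        (fun l => l ++ [(PySem.Dict.mk e).getD "song_name" ""])) PySem.Dict.empty := by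
    have hfn : (fun (d : PySem.Dict String (List String)) (entry : List (String × String)) =>
        let album_title := (PySem.Dict.mk entry).getD "album_title" ""
        let song_name := (PySem.Dict.mk entry).getD "song_name" ""
        let d := if d.contains album_title = false then d.insert album_title ([] : List String) else d
        d.modify album_title [] (fun l => l ++ [song_name]))
      = (fun (d : PySem.Dict String (List String)) e => d.modify ((PySem.Dict.mk e).getD "album_title" "") []
          (fun l => l ++ [(PySem.Dict.mk e).getD "song_name" ""])) := by
      funext d e
      exact step_eq d _ _
    rw [hfn]
  simp only [hfold]
  exact dict_sorted_items_eq album_data
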